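-- pv_equiv track=rewrite | github.com/Pochingto/advent_of_code_2023 | day3/main.py | explore_number
-- ===== SOURCE A (Python) =====
-- def explore_number(lines: list[str], i: int, j: int, visited: set[int]) -> int:
--     if i < 0 or i >= len(lines):
--         return 0
--     if j < 0 or j >= len(lines[i]):
--         return 0
--     if not lines[i][j].isdigit():
--         return 0
--     if i * len(lines[i]) + j in visited:
--         return 0
--
--     line = lines[i]
--     start, end = j, j
--     while start > 0 and line[start - 1].isdigit():
--         start -= 1
--     while end < len(line) - 1 and line[end + 1].isdigit():
--         end += 1
--
--     for offset in range(start, end + 1):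
--         index = i * len(line) + offset
--         visited.add(index)
--
--     return int(line[start : end + 1])
-- ===== SOURCE B (Python) =====
-- def explore_number(lines: list[str], i: int, j: int, visited: set[int]) -> int:
--     if i < 0 or i >= len(lines):
--         return 0
--     line = lines[i]
--     if j < 0 or j >= len(line):
--         return 0
--     if not line[j].isdigit():
--         return 0
--     if i * len(line) + j in visited:
--         return 0
--
--     # one forward pass: collect all maximal digit runs [s, e) of the line
--     runs = []
--     s = None
--     for k, c in enumerate(line):
--         if c.isdigit():
--             if s is None:
--                 s = k
--         elif s is not None:
--             runs.append((s, k))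
--             s = None
--     if s is not None:
--         runs.append((s, len(line)))
--
--     # pick the run containing j, mark it visited, parse it
--     for (s, e) in runs:
--         if s <= j < e:
--             for offset in range(s, e):
--                 visited.add(i * len(line) + offset)
--             return int(line[s:e])
--     return 0
-- ===== Notes on version B (the rewrite author's own statement) =====
-- stated objective: alternative
-- what changed: Replaces the bidirectional while-loop expansion around j with a single forward pass that enumerates all maximal digit runs of the line and then selects the run whose span contains j.
import Mathlib
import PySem

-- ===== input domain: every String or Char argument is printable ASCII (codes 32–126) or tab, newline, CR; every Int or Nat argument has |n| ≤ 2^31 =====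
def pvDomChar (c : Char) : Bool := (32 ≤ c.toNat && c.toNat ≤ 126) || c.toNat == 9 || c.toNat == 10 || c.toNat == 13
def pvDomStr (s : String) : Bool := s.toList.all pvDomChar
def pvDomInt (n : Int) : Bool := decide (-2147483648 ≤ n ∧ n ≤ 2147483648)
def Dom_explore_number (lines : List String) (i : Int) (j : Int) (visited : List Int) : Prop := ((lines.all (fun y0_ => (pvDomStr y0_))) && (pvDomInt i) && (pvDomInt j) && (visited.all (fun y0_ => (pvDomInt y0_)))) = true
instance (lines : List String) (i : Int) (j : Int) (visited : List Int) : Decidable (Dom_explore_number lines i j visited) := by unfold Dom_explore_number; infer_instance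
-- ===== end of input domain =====

-- B replaces A's bidirectional expansion around j with one forward pass listing all maximal
-- digit runs, then selecting the run containing j (objective: alternative, same cost).
-- Both Pythons mutate `visited` identically (they add the same run's indices); the theorems
-- below are about the RETURN value, and `visited` is only read here (Set membership test).

-- ===== PORT A =====
-- while start > 0 and line[start-1].isdigit(): start -= 1
def goLeft (cs : List Char) : Nat → Nat
  | 0 => 0
  | s + 1 => if PySem.Chars.isdigit (cs.getD s ' ') then goLeft cs s else s + 1

-- while end < len(line) - 1 and line[end+1].isdigit(): end += 1
def goRight (cs : List Char) (e : Nat) : Nat :=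
  if h : e + 1 < cs.length ∧ PySem.Chars.isdigit (cs.getD (e + 1) ' ') then goRight cs (e + 1) else e
termination_by cs.length - e
decreasing_by omega

-- int(line[start:end+1]): the slice is a nonempty all-digit string, so int() cannot raise;
-- `.getD 0` is unreachable. Indexing uses getD on in-range nonnegative indices (exact there).
def explore_number (lines : List String) (i : Int) (j : Int) (visited : List Int) : Int :=
  if i < 0 ∨ (lines.length : Int) ≤ i then 0
  else
    let line := (PySem.List.pyGetD lines i "").toList
    if j < 0 ∨ (line.length : Int) ≤ j then 0
    else if ¬ PySem.Chars.isdigit (line.getD j.toNat ' ') then 0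
    else if PySem.Set.contains visited (i * (line.length : Int) + j) then 0
    else
      let s := goLeft line j.toNat
      let e := goRight line j.toNat
      (PySem.Int.ofChars? ((line.drop s).take (e + 1 - s))).getD 0

-- ===== PORT B =====
-- the enumerate loop of Source B: k is the current index, st the start of the pending digit run
def digitRuns (cs : List Char) (k : Nat) (st : Option Nat) : List (Nat × Nat) :=
  match cs with
  | [] => match st with | some s0 => [(s0, k)] | none => []
  | c :: rest =>
    if PySem.Chars.isdigit c then digitRuns rest (k + 1) (some (st.getD k))
    else match st with
      | some s0 => (s0, k) :: digitRuns rest (k + 1) none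
      | none => digitRuns rest (k + 1) none

def explore_number_alt (lines : List String) (i : Int) (j : Int) (visited : List Int) : Int :=
  if i < 0 ∨ (lines.length : Int) ≤ i then 0
  else
    let line := (PySem.List.pyGetD lines i "").toList
    if j < 0 ∨ (line.length : Int) ≤ j then 0
    else if ¬ PySem.Chars.isdigit (line.getD j.toNat ' ') then 0
    else if PySem.Set.contains visited (i * (line.length : Int) + j) then 0
    else
      match (digitRuns line 0 none).find? (fun p => p.1 ≤ j.toNat && j.toNat < p.2) with
      | some (s, e) => (PySem.Int.ofChars? ((line.drop s).take (e - s))).getD 0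
      | none => 0

-- ===== PRECONDITION & SPEC =====
def Spec_explore_number (lines : List String) (i : Int) (j : Int) (visited : List Int) (out : Int) : Prop := out = explore_number_alt lines i j visited
instance (lines : List String) (i : Int) (j : Int) (visited : List Int) (out : Int) : Decidable (Spec_explore_number lines i j visited out) := by unfold Spec_explore_number; infer_instance

-- ===== CLAIM (what is proved, stated in full; the proofs are below) =====
def Claim_equal_explore_number : Prop := ∀ (lines : List String) (i : Int) (j : Int) (visited : List Int), Dom_explore_number lines i j visited → Spec_explore_number lines i j visited (explore_number lines i j visited)

-- ===== LEMMAS AND PROOFS =====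

-- a maximal digit run [s, e) of cs
def IsRun (cs : List Char) (s e : Nat) : Prop :=
  s < e ∧ e ≤ cs.length ∧ (∀ k, s ≤ k → k < e → PySem.Chars.isdigit (cs.getD k ' ') = true) ∧
    (s = 0 ∨ PySem.Chars.isdigit (cs.getD (s - 1) ' ') = false) ∧
    (e = cs.length ∨ PySem.Chars.isdigit (cs.getD e ' ') = false)

theorem goLeft_spec (cs : List Char) (jn : Nat)
    (hd : PySem.Chars.isdigit (cs.getD jn ' ') = true) :
    goLeft cs jn ≤ jn ∧ (∀ k, goLeft cs jn ≤ k → k ≤ jn → PySem.Chars.isdigit (cs.getD k ' ') = true) ∧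
      (goLeft cs jn = 0 ∨ PySem.Chars.isdigit (cs.getD (goLeft cs jn - 1) ' ') = false) := by
  induction jn with
  | zero => exact ⟨le_refl _, fun k hk hk' => by simpa [Nat.le_zero.mp hk'] using hd, Or.inl rfl⟩
  | succ n ih =>
    rw [goLeft]
    by_cases h : PySem.Chars.isdigit (cs.getD n ' ') = true
    · rw [if_pos h]
      obtain ⟨h1, h2, h3⟩ := ih h
      refine ⟨Nat.le_succ_of_le h1, ?_, h3⟩
      intro k hk hk'
      rcases Nat.lt_or_ge k (n + 1) with hlt | hge
      · exact h2 k hk (by omega)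
      · have hk1 : k = n + 1 := by omega
        rw [hk1]; exact hd
    · rw [if_neg h]
      exact ⟨le_refl _, fun k hk hk' => by rw [show k = n + 1 by omega]; exact hd,
        Or.inr ((Bool.not_eq_true _).mp (by simpa using h))⟩

theorem goRight_spec (cs : List Char) (jn : Nat) (hj : jn < cs.length) :
    jn ≤ goRight cs jn ∧ goRight cs jn < cs.length ∧
      (∀ k, jn ≤ k → k ≤ goRight cs jn → k = jn ∨ PySem.Chars.isdigit (cs.getD k ' ') = true) ∧
      (goRight cs jn + 1 = cs.length ∨ PySem.Chars.isdigit (cs.getD (goRight cs jn + 1) ' ') = false) := by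
  fun_induction goRight cs jn with
  | case1 e h ih =>
    obtain ⟨h1, h2, h3, h4⟩ := ih h.1
    refine ⟨by omega, h2, ?_, h4⟩
    intro k hk hk'
    rcases Nat.lt_or_ge k (e + 1) with hlt | hge
    · left; omega
    · rcases h3 k hge hk' with h' | h'
      · right; exact h' ▸ h.2
      · right; exact h'
  | case2 e h =>
    rw [not_and_or] at h
    refine ⟨le_refl _, hj, fun k hk hk' => Or.inl (by omega), ?_⟩
    rcases h with h | h
    · left; omega
    · exact Or.inr ((Bool.not_eq_true _).mp h)

theorem run_of_go (cs : List Char) (jn : Nat) (hj : jn < cs.length)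
    (hd : PySem.Chars.isdigit (cs.getD jn ' ') = true) :
    IsRun cs (goLeft cs jn) (goRight cs jn + 1) ∧ goLeft cs jn ≤ jn ∧ jn < goRight cs jn + 1 := by
  obtain ⟨l1, l2, l3⟩ := goLeft_spec cs jn hd
  obtain ⟨r1, r2, r3, r4⟩ := goRight_spec cs jn hj
  refine ⟨⟨by omega, by omega, ?_, l3, r4⟩, l1, by omega⟩
  intro k hk hk'
  rcases Nat.lt_or_ge jn k with h | h
  · rcases r3 k (by omega) (by omega) with h' | h'
    · omega
    · exact h'
  · exact l2 k hk h

-- any two maximal runs containing the same index coincide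
theorem run_unique (cs : List Char) {s e s' e' jn : Nat}
    (h1 : IsRun cs s e) (h2 : IsRun cs s' e')
    (hj1 : s ≤ jn ∧ jn < e) (hj2 : s' ≤ jn ∧ jn < e') : s = s' ∧ e = e' := by
  obtain ⟨_, he, hall, hl, hr⟩ := h1
  obtain ⟨_, he', hall', hl', hr'⟩ := h2
  constructor
  · rcases Nat.lt_trichotomy s s' with h | h | h
    · rcases hl' with h0 | h0
      · omega
      · rw [hall (s' - 1) (by omega) (by omega)] at h0
        exact absurd h0 (by decide)
    · exact h
    · rcases hl with h0 | h0
      · omega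
      · rw [hall' (s - 1) (by omega) (by omega)] at h0
        exact absurd h0 (by decide)
  · rcases Nat.lt_trichotomy e e' with h | h | h
    · rcases hr with h0 | h0
      · omega
      · rw [hall' e (by omega) h] at h0
        exact absurd h0 (by decide)
    · exact h
    · rcases hr' with h0 | h0
      · omega
      · rw [hall e' (by omega) h] at h0
        exact absurd h0 (by decide)

-- invariant carried by the scan of Source B: st is the pending run's start; with no pending run
-- the previous character (if any) is a non-digit
def StInv (fs : List Char) (k : Nat) : Option Nat → Prop
  | none => k = 0 ∨ PySem.Chars.isdigit (fs.getD (k - 1) ' ') = false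
  | some s0 => s0 < k ∧ (∀ m, s0 ≤ m → m < k → PySem.Chars.isdigit (fs.getD m ' ') = true) ∧
      (s0 = 0 ∨ PySem.Chars.isdigit (fs.getD (s0 - 1) ' ') = false)

theorem runs_key (fs : List Char) : ∀ (cs : List Char) (k : Nat) (st : Option Nat),
    cs = fs.drop k → k ≤ fs.length → StInv fs k st →
    (∀ p ∈ digitRuns cs k st, IsRun fs p.1 p.2) ∧
    (∀ jn, jn < fs.length → PySem.Chars.isdigit (fs.getD jn ' ') = true →
      (match st with | some s0 => s0 ≤ jn | none => k ≤ jn) →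
      ∃ p ∈ digitRuns cs k st, p.1 ≤ jn ∧ jn < p.2) := by
  intro cs
  induction cs with
  | nil =>
    intro k st hcs hk hinv
    have hk' : k = fs.length := by
      by_contra h
      have hne : fs.drop k ≠ [] := by simp [List.drop_eq_nil_iff]; omega
      exact hne hcs.symm
    cases st with
    | none =>
      refine ⟨fun p hp => by simp [digitRuns] at hp, fun jn hjn hd hc => ?_⟩
      simp at hc; omega
    | some s0 =>
      obtain ⟨hs0, hall, hl⟩ := hinv
      constructor
      · intro p hp
        simp [digitRuns] at hp
        subst hp
        exact ⟨by omega, by omega, fun m hm hm' => hall m hm (by omega), hl, Or.inl hk'⟩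
      · intro jn hjn hd hc
        simp at hc
        exact ⟨(s0, k), by simp [digitRuns], hc, by omega⟩
  | cons c rest ih =>
    intro k st hcs hk hinv
    have hklt : k < fs.length := by
      by_contra h
      have : fs.drop k = [] := by simp [List.drop_eq_nil_iff]; omega
      rw [this] at hcs; exact List.cons_ne_nil _ _ hcs
    have hsplit := List.drop_eq_getElem_cons hklt
    rw [hsplit] at hcs
    obtain ⟨hc, hrest⟩ : c = fs[k] ∧ rest = fs.drop (k + 1) := by
      have := List.cons.injEq c rest fs[k] (fs.drop (k + 1)) ▸ hcs
      exact ⟨this.1, this.2⟩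
    have hcD : c = fs.getD k ' ' := by rw [hc, List.getD_eq_getElem _ _ hklt]
    by_cases hd : PySem.Chars.isdigit c = true
    · -- digit: extend / start a run
      have hinv' : StInv fs (k + 1) (some (st.getD k)) := by
        cases st with
        | none =>
          simp only [Option.getD_none]
          exact ⟨by omega, fun m hm hm' => by rw [show m = k by omega, ← hcD]; exact hd,
            by simpa using hinv⟩
        | some s0 =>
          obtain ⟨hs0, hall, hl⟩ := hinv
          simp only [Option.getD_some]
          refine ⟨by omega, ?_, hl⟩
          intro m hm hm'
          rcases Nat.lt_or_ge m k with h | h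
          · exact hall m hm h
          · have : m = k := by omega
            rw [this, ← hcD]; exact hd
      have hstep : digitRuns (c :: rest) k st = digitRuns rest (k + 1) (some (st.getD k)) := by
        cases st <;> simp [digitRuns, hd]
      obtain ⟨ihS, ihC⟩ := ih (k + 1) (some (st.getD k)) hrest (by omega) hinv'
      constructor
      · intro p hp
        rw [hstep] at hp
        exact ihS p hp
      · intro jn hjn hdj hcnd
        have : st.getD k ≤ jn := by cases st with
          | none => simpa using hcnd
          | some s0 => simpa using hcnd
        obtain ⟨p, hp, hp'⟩ := ihC jn hjn hdj (by simpa using this)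
        refine ⟨p, ?_, hp'⟩
        rw [hstep]
        exact hp
    · -- non-digit: close the pending run (if any)
      have hkd : PySem.Chars.isdigit (fs.getD k ' ') = false := by
        rw [← hcD]; exact (Bool.not_eq_true _).mp hd
      have hinvN : StInv fs (k + 1) none := Or.inr (by simpa using hkd)
      cases st with
      | none =>
        have hstep : digitRuns (c :: rest) k none = digitRuns rest (k + 1) none := by
          simp [digitRuns, hd]
        obtain ⟨ihS, ihC⟩ := ih (k + 1) none hrest (by omega) hinvN
        constructor
        · intro p hp
          rw [hstep] at hp
          exact ihS p hp
        · intro jn hjn hdj hcnd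
          simp at hcnd
          have hne : jn ≠ k := by
            intro h
            rw [h, ← hcD] at hdj
            exact hd hdj
          obtain ⟨p, hp, hp'⟩ := ihC jn hjn hdj (by simp; omega)
          refine ⟨p, ?_, hp'⟩
          rw [hstep]
          exact hp
      | some s0 =>
        have hstep : digitRuns (c :: rest) k (some s0) = (s0, k) :: digitRuns rest (k + 1) none := by
          simp [digitRuns, hd]
        obtain ⟨hs0, hall, hl⟩ := hinv
        obtain ⟨ihS, ihC⟩ := ih (k + 1) none hrest (by omega) hinvN
        constructor
        · intro p hp
          rw [hstep] at hp
          rcases List.mem_cons.mp hp with h | h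
          · subst h
            exact ⟨by omega, by omega, fun m hm hm' => hall m hm (by omega), hl,
              Or.inr (by rw [← hcD]; exact (Bool.not_eq_true _).mp hd)⟩
          · exact ihS p h
        · intro jn hjn hdj hcnd
          simp at hcnd
          have hne : jn ≠ k := by
            intro h
            rw [h, ← hcD] at hdj
            exact hd hdj
          rcases Nat.lt_or_ge jn k with h | h
          · exact ⟨(s0, k), by rw [hstep]; exact List.mem_cons_self, hcnd, h⟩
          · obtain ⟨p, hp, hp'⟩ := ihC jn hjn hdj (by simp; omega)
            refine ⟨p, ?_, hp'⟩
            rw [hstep]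
            exact List.mem_cons_of_mem _ hp
  
theorem core_eq (cs : List Char) (jn : Nat) (hj : jn < cs.length)
    (hd : PySem.Chars.isdigit (cs.getD jn ' ') = true) :
    (digitRuns cs 0 none).find? (fun p => p.1 ≤ jn && jn < p.2) =
      some (goLeft cs jn, goRight cs jn + 1) := by
  obtain ⟨hS, hC⟩ := runs_key cs cs 0 none (by simp) (by omega) (Or.inl rfl)
  obtain ⟨p, hp, hp1, hp2⟩ := hC jn hj hd (by simp)
  have hfind : ((digitRuns cs 0 none).find? (fun p => p.1 ≤ jn && jn < p.2)).isSome := by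
    rw [List.find?_isSome]
    exact ⟨p, hp, by simp [hp1, hp2]⟩
  obtain ⟨q, hq⟩ := Option.isSome_iff_exists.mp hfind
  have hqmem := List.mem_of_find?_eq_some hq
  have hqpred := List.find?_some hq
  simp only [Bool.and_eq_true, decide_eq_true_eq] at hqpred
  obtain ⟨hrg, hgl, hgr⟩ := run_of_go cs jn hj hd
  obtain ⟨e1, e2⟩ := run_unique cs (hS q hqmem) hrg ⟨hqpred.1, hqpred.2⟩ ⟨hgl, hgr⟩
  rw [hq]
  congr 1
  exact Prod.ext e1 e2

-- ===== VERDICT (by name: the statement is the Claim_ definition above) =====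
theorem explore_number_spec : Claim_equal_explore_number := by
  intro lines i j visited _
  unfold Spec_explore_number explore_number explore_number_alt
  by_cases h1 : i < 0 ∨ (lines.length : Int) ≤ i
  · simp only [h1, if_true]
  · simp only [h1, if_false]
    set line := (PySem.List.pyGetD lines i "").toList with hline
    by_cases h2 : j < 0 ∨ (line.length : Int) ≤ j
    · simp only [h2, if_true]
    · simp only [h2, if_false]
      by_cases h3 : ¬ PySem.Chars.isdigit (line.getD j.toNat ' ') = true
      · rw [if_pos h3, if_pos h3]
      · simp only [h3, if_false]
        by_cases h4 : PySem.Set.contains visited (i * (line.length : Int) + j) = true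
        · simp only [h4, if_true]
        · simp only [h4]
          have hj : j.toNat < line.length := by omega
          have hd : PySem.Chars.isdigit (line.getD j.toNat ' ') = true := by
            exact not_not.mp h3
          rw [core_eq line j.toNat hj hd]
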